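-- pv_equiv track=rewrite | github.com/BlueBeret/shopee-tebak-kata | solver.py | arrange_strings_by_length
-- ===== SOURCE A (Python) =====
-- def arrange_strings_by_length(strings):
--     # Separate the strings based on their lengths using a dictionary
--     strings_by_length = {}
--     for string in strings:
--         length = len(string)
--         if length in strings_by_length:
--             strings_by_length[length].append(string)
--         else:
--             strings_by_length[length] = [string]
--
--     # Sort each group of strings with the same length
--
--     # Combine the sorted groups back into a single list
--     arranged_list = []
--
--     # get keys
--     keys = list(strings_by_length.keys())
--     keys.sort(reverse=True)
--
--     i = 0
--     # while strings_by_length is not empty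
--     while len(keys) > 0:
--         # get the first key
--         key = keys[i%len(keys)]
--         # get the first value of the key
--         value = strings_by_length[key][0]
--         # add the value to the arranged list
--         arranged_list.append(value)
--         # remove the value from the dictionary
--         strings_by_length[key].remove(value)
--         # if the value is empty
--         if len(strings_by_length[key]) == 0:
--             # remove the key
--             keys.remove(key)
--         # else
--         else:
--             # sort the value
--             strings_by_length[key].sort()
--
--         i += 1
--
--     return arranged_list
-- ===== SOURCE B (Python) =====
-- def arrange_strings_by_length(strings):
--     # Group by length once.
--     groups = {}
--     for s in strings:
--         groups.setdefault(len(s), []).append(s)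
--     # Precompute each group's full emission order up front: A always emits the
--     # group's current first element and then keeps the remainder sorted, so the
--     # emission order of a group g is g[0] followed by sorted(g[1:]).
--     queues = {k: (0, [g[0]] + sorted(g[1:])) for k, g in groups.items()}
--     keys = sorted(queues, reverse=True)
--     out = []
--     i = 0
--     while keys:
--         key = keys[i % len(keys)]
--         p, q = queues[key]
--         out.append(q[p])
--         queues[key] = (p + 1, q)
--         if p + 1 == len(q):
--             keys.remove(key)
--         i += 1
--     return out
-- ===== Notes on version B (the rewrite author's own statement) =====
-- stated objective: faster
-- what changed: Instead of re-sorting the current group and doing a list.remove on it at every round-robin step, B precomputes each length-group's full emission order once (first arrival, then the remaining strings sorted) and the loop just advances a per-group position index.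
import Mathlib
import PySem

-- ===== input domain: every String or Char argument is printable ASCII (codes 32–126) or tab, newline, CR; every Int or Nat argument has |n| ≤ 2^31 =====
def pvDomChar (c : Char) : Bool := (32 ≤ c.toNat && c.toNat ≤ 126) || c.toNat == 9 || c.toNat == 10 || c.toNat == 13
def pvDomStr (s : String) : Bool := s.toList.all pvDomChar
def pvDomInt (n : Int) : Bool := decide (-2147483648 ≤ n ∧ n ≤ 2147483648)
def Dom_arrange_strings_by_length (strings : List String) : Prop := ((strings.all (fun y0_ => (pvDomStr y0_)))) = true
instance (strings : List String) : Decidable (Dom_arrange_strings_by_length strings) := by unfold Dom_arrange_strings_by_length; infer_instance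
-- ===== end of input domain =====

-- B replaces A's per-step re-sort and list.remove by queues whose emission order
-- (first arrival, then the rest sorted) is precomputed once; same round-robin output.

-- ===== PORT A =====
-- grouping loop: 'if length in d: d[length].append(s) else: d[length] = [s]'
def pvGroupA (strings : List String) : PySem.Dict Int (List String) :=
  strings.foldl (fun d s =>
    if d.contains (PySem.Str.len s) then
      d.insert (PySem.Str.len s) (d.getD (PySem.Str.len s) [] ++ [s])
    else
      d.insert (PySem.Str.len s) [s]) PySem.Dict.empty

-- A's while loop; fuel = number of remaining elements (one is removed per iteration).
-- The '[] => acc' arm is Python's IndexError on grp[0]; it is never reached (groups stay nonempty).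
def pvLoopA : Nat → List Int → PySem.Dict Int (List String) → Nat → List String → List String
  | 0, _, _, _, acc => acc
  | fuel+1, keys, d, i, acc =>
    if keys = [] then acc else
    match d.getD (keys.getD (i % keys.length) 0) [] with
    | [] => acc
    | v :: _ =>
      if (PySem.List.remove? (d.getD (keys.getD (i % keys.length) 0) []) v).getD [] = [] then
        pvLoopA fuel ((PySem.List.remove? keys (keys.getD (i % keys.length) 0)).getD [])
          (d.insert (keys.getD (i % keys.length) 0)
            ((PySem.List.remove? (d.getD (keys.getD (i % keys.length) 0) []) v).getD []))
          (i+1) (acc ++ [v])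
      else
        pvLoopA fuel keys
          (d.insert (keys.getD (i % keys.length) 0)
            (PySem.List.sorted
              ((PySem.List.remove? (d.getD (keys.getD (i % keys.length) 0) []) v).getD [])
              (fun x => x)))
          (i+1) (acc ++ [v])

def arrange_strings_by_length (strings : List String) : List String :=
  let d := pvGroupA strings
  let keys := PySem.List.sorted d.keys (fun x => x) true
  pvLoopA strings.length keys d 0 []

-- ===== PORT B =====
-- grouping loop: 'groups.setdefault(len(s), []).append(s)'
def pvGroupB (strings : List String) : PySem.Dict Int (List String) :=
  strings.foldl (fun d s => d.modify (PySem.Str.len s) [] (fun g => g ++ [s])) PySem.Dict.empty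

-- '[g[0]] + sorted(g[1:])' (g is never empty; [] arm is the vacuous case)
def pvEmit (g : List String) : List String :=
  match g with
  | [] => []
  | h :: t => h :: PySem.List.sorted t (fun x => x)

-- '{k: (0, [g[0]] + sorted(g[1:])) for k, g in groups.items()}'
def pvQueues (d : PySem.Dict Int (List String)) : PySem.Dict Int (Int × List String) :=
  PySem.Dict.ofList (d.items.map (fun p => (p.1, ((0 : Int), pvEmit p.2))))

-- B's while loop: read queues[key][pos], advance pos; no re-sorting, no list.remove on the group.
def pvLoopB : Nat → List Int → PySem.Dict Int (Int × List String) → Nat → List String → List String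
  | 0, _, _, _, acc => acc
  | fuel+1, keys, q, i, acc =>
    if keys = [] then acc else
    pvLoopB fuel
      (if (q.getD (keys.getD (i % keys.length) 0) (0, [])).1 + 1 =
          ((q.getD (keys.getD (i % keys.length) 0) (0, [])).2.length : Int) then
        (PySem.List.remove? keys (keys.getD (i % keys.length) 0)).getD []
      else keys)
      (q.insert (keys.getD (i % keys.length) 0)
        ((q.getD (keys.getD (i % keys.length) 0) (0, [])).1 + 1,
         (q.getD (keys.getD (i % keys.length) 0) (0, [])).2))
      (i+1)
      (acc ++ [PySem.List.pyGetD (q.getD (keys.getD (i % keys.length) 0) (0, [])).2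
        (q.getD (keys.getD (i % keys.length) 0) (0, [])).1 ""])

def arrange_strings_by_length_alt (strings : List String) : List String :=
  let q := pvQueues (pvGroupB strings)
  let keys := PySem.List.sorted q.keys (fun x => x) true
  pvLoopB strings.length keys q 0 []

-- ===== PRECONDITION & SPEC =====
def Spec_arrange_strings_by_length (strings : List String) (out : List String) : Prop := out = arrange_strings_by_length_alt strings
instance (strings : List String) (out : List String) : Decidable (Spec_arrange_strings_by_length strings out) := by unfold Spec_arrange_strings_by_length; infer_instance

-- ===== CLAIM (what is proved, stated in full; the proofs are below) =====
def Claim_equal_arrange_strings_by_length : Prop := ∀ (strings : List String), Dom_arrange_strings_by_length strings → Spec_arrange_strings_by_length strings (arrange_strings_by_length strings)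

-- ===== LEMMAS AND PROOFS =====

-- A's if/else grouping step IS dict.modify (append with default []).
theorem pvStep_eq : (fun (d : PySem.Dict Int (List String)) (s : String) =>
    if d.contains (PySem.Str.len s) then
      d.insert (PySem.Str.len s) (d.getD (PySem.Str.len s) [] ++ [s])
    else
      d.insert (PySem.Str.len s) [s]) =
    (fun (d : PySem.Dict Int (List String)) (s : String) =>
      d.modify (PySem.Str.len s) [] (fun g => g ++ [s])) := by
  funext d s
  rw [PySem.Dict.modify]
  by_cases h : d.contains (PySem.Str.len s) = true
  · rw [if_pos h]
  · rw [if_neg h, PySem.Dict.getD_of_not_contains d [] (eq_false_of_ne_true h), List.nil_append]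

theorem pvGroupA_eq_pvGroupB (strings : List String) : pvGroupA strings = pvGroupB strings := by
  unfold pvGroupA pvGroupB
  rw [pvStep_eq]

theorem pvGroupB_keys_nodup (strings : List String) : (pvGroupB strings).keys.Nodup := by
  unfold pvGroupB
  exact PySem.Dict.nodup_keys_foldl_modify_key strings (fun s => PySem.Str.len s) []
    (fun _ s g => g ++ [s]) PySem.Dict.empty (by simp [PySem.Dict.keys_empty])

theorem pvGroupB_values_ne_nil (strings : List String) :
    ∀ k g, (pvGroupB strings).get? k = some g → g ≠ [] := by
  unfold pvGroupB
  suffices h : ∀ (l : List String) (d : PySem.Dict Int (List String)),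
      (∀ k g, d.get? k = some g → g ≠ []) →
      ∀ k g, (l.foldl (fun d s => d.modify (PySem.Str.len s) [] (fun g => g ++ [s])) d).get? k = some g → g ≠ [] by
    exact h strings PySem.Dict.empty (by intro k g hg; simp [PySem.Dict.get?_empty] at hg)
  intro l
  induction l with
  | nil => intro d hd; simpa using hd
  | cons s l ih =>
    intro d hd k g
    simp only [List.foldl_cons]
    refine ih _ ?_ k g
    intro k' g' hg'
    rw [PySem.Dict.modify, PySem.Dict.get?_insert] at hg'
    by_cases hk : k' = PySem.Str.len s
    · simp [hk] at hg'; simp [← hg']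
    · rw [if_neg hk] at hg'; exact hd k' g' hg'

theorem pvQueues_items (d : PySem.Dict Int (List String)) (hnd : d.keys.Nodup) :
    (pvQueues d).items = d.items.map (fun p => (p.1, ((0 : Int), pvEmit p.2))) := by
  unfold pvQueues
  rw [PySem.Dict.ofList, PySem.Dict.update]
  have := PySem.Dict.items_foldl_insert_fresh
      (d.items.map (fun p => (p.1, ((0 : Int), pvEmit p.2))))
      (fun p => p.1) (fun p => p.2) PySem.Dict.empty
      (by intro a _; simp [PySem.Dict.contains_empty])
      (by simpa [List.map_map, Function.comp_def, PySem.Dict.keys] using hnd)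
  simpa [PySem.Dict.empty, List.map_map, Function.comp_def] using this

theorem pvQueues_keys (d : PySem.Dict Int (List String)) (hnd : d.keys.Nodup) :
    (pvQueues d).keys = d.keys := by
  simp [PySem.Dict.keys, pvQueues_items d hnd, List.map_map, Function.comp_def]

theorem pvQueues_get? (d : PySem.Dict Int (List String)) (hnd : d.keys.Nodup)
    (k : Int) (g : List String) (hg : d.get? k = some g) :
    (pvQueues d).get? k = some ((0 : Int), pvEmit g) := by
  have hmem : (k, g) ∈ d.items := PySem.Dict.mem_items_of_get?_eq_some d hg
  have hmem' : (k, ((0 : Int), pvEmit g)) ∈ (pvQueues d).items := by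
    rw [pvQueues_items d hnd]
    exact List.mem_map.mpr ⟨(k, g), hmem, rfl⟩
  exact PySem.Dict.get?_of_mem_items _ hmem' (by rw [pvQueues_keys d hnd]; exact hnd)

-- the tail of a sorted list is already sorted
theorem pvSorted_tail (t : List String) (h' : String) (t' : List String)
    (h : PySem.List.sorted t (fun x => x) = h' :: t') :
    PySem.List.sorted t' (fun x => x) = t' := by
  have hp := PySem.List.sorted_pairwise t (fun x => x)
  rw [h, List.pairwise_cons] at hp
  exact PySem.List.sorted_eq_self_of_pairwise t' (fun x => x) hp.2

-- the loop invariant tying A's state (current group) to B's (position + precomputed queue)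
def pvInv (keys : List Int) (dA : PySem.Dict Int (List String))
    (dB : PySem.Dict Int (Int × List String)) : Prop :=
  keys.Nodup ∧ ∀ k ∈ keys, ∃ (h : String) (t : List String) (p : Int) (lst : List String),
    dA.get? k = some (h :: t) ∧ dB.get? k = some (p, lst) ∧ 0 ≤ p ∧
    lst.drop p.toNat = h :: PySem.List.sorted t (fun x => x)

theorem pvLoop_eq (fuel : Nat) : ∀ (keys : List Int) (dA : PySem.Dict Int (List String))
    (dB : PySem.Dict Int (Int × List String)) (i : Nat) (acc : List String),
    pvInv keys dA dB → pvLoopA fuel keys dA i acc = pvLoopB fuel keys dB i acc := by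
  induction fuel with
  | zero => intro keys dA dB i acc _; rfl
  | succ fuel ih =>
    intro keys dA dB i acc hinv
    obtain ⟨hnd, hrel⟩ := hinv
    by_cases hk : keys = []
    · simp [pvLoopA, pvLoopB, hk]
    · rw [pvLoopA, pvLoopB, if_neg hk, if_neg hk]
      have hlen : 0 < keys.length := List.length_pos_iff.mpr hk
      have hkey_mem : keys.getD (i % keys.length) 0 ∈ keys := by
        rw [List.getD_eq_getElem keys 0 (Nat.mod_lt i hlen)]
        exact List.getElem_mem _
      set key := keys.getD (i % keys.length) 0 with hkeydef
      obtain ⟨h, t, p, lst, hA, hB, hp, hdrop⟩ := hrel key hkey_mem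
      have hAgetD : dA.getD key [] = h :: t := by
        rw [PySem.Dict.getD_eq_get?_getD, hA]; rfl
      have hBgetD : dB.getD key (0, []) = (p, lst) := by
        rw [PySem.Dict.getD_eq_get?_getD, hB]; rfl
      -- the emitted values agree
      have hplen : p.toNat < lst.length := by
        by_contra hge
        rw [List.drop_eq_nil_of_le (by omega)] at hdrop
        simp at hdrop
      have hv : PySem.List.pyGetD lst p "" = h := by
        rw [PySem.List.pyGetD_of_nonneg lst "" hp, List.getD_eq_getElem lst "" hplen]
        have h0 : (lst.drop p.toNat).head? = some h := by rw [hdrop]; rfl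
        rw [List.head?_drop, List.getElem?_eq_getElem hplen] at h0
        exact Option.some.inj h0
      -- lengths: lst.length = p.toNat + 1 + t.length
      have hlstlen : lst.length = p.toNat + 1 + t.length := by
        have := congrArg List.length hdrop
        rw [List.length_drop] at this
        simp [PySem.List.length_sorted] at this
        omega
      -- the exhaustion tests agree
      have hcond : (p + 1 = (lst.length : Int)) ↔ (t = []) := by
        constructor
        · intro hq
          have : lst.length = p.toNat + 1 := by omega
          have : t.length = 0 := by omega
          exact List.length_eq_zero_iff.mp this
        · intro ht; subst ht; simp at hlstlen; omega
      have hrest : (PySem.List.remove? (h :: t) h).getD [] = t := by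
        rw [PySem.List.remove?_cons_self]; rfl
      simp only [hAgetD, hBgetD, hrest, hv]
      by_cases ht : t = []
      · -- group exhausted: both remove key from keys
        rw [if_pos ht, if_pos (hcond.mpr ht)]
        apply ih
        have hkeys' : (PySem.List.remove? keys key).getD [] = keys.erase key := by
          rw [PySem.List.remove?_eq_some_erase keys key hkey_mem]; rfl
        rw [hkeys']
        refine ⟨hnd.erase key, ?_⟩
        intro k hk'
        have hk2 := (hnd.mem_erase_iff.mp hk')
        obtain ⟨h2, t2, p2, lst2, hA2, hB2, hp2, hdrop2⟩ := hrel k hk2.2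
        exact ⟨h2, t2, p2, lst2,
          by rw [PySem.Dict.get?_insert, if_neg hk2.1]; exact hA2,
          by rw [PySem.Dict.get?_insert, if_neg hk2.1]; exact hB2, hp2, hdrop2⟩
      · -- group continues: A re-sorts the remainder; B just advances the position
        rw [if_neg ht, if_neg (fun hq => ht (hcond.mp hq))]
        apply ih
        refine ⟨hnd, ?_⟩
        intro k hk'
        by_cases hkk : k = key
        · subst hkk
          have hsne : PySem.List.sorted t (fun x => x) ≠ [] :=
            fun hq => ht ((PySem.List.sorted_eq_nil_iff t (fun x => x) false).mp hq)
          obtain ⟨h', t', hs⟩ := List.exists_cons_of_ne_nil hsne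
          refine ⟨h', t', p + 1, lst,
            by rw [PySem.Dict.get?_insert, if_pos rfl, hs],
            by rw [PySem.Dict.get?_insert, if_pos rfl], by omega, ?_⟩
          have htoNat : (p + 1).toNat = p.toNat + 1 := by omega
          rw [htoNat, ← List.drop_drop, hdrop]
          simp only [List.drop_one, List.tail_cons]
          rw [hs, pvSorted_tail t h' t' hs]
        · obtain ⟨h2, t2, p2, lst2, hA2, hB2, hp2, hdrop2⟩ := hrel k hk'
          exact ⟨h2, t2, p2, lst2,
            by rw [PySem.Dict.get?_insert, if_neg hkk]; exact hA2,
            by rw [PySem.Dict.get?_insert, if_neg hkk]; exact hB2, hp2, hdrop2⟩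

-- ===== VERDICT (by name: the statement is the Claim_ definition above) =====
theorem arrange_strings_by_length_spec : Claim_equal_arrange_strings_by_length := by
  intro strings _
  show arrange_strings_by_length strings = arrange_strings_by_length_alt strings
  show pvLoopA strings.length
      (PySem.List.sorted (pvGroupA strings).keys (fun x => x) true) (pvGroupA strings) 0 [] =
    pvLoopB strings.length
      (PySem.List.sorted (pvQueues (pvGroupB strings)).keys (fun x => x) true)
      (pvQueues (pvGroupB strings)) 0 []
  rw [pvGroupA_eq_pvGroupB]
  have hnd := pvGroupB_keys_nodup strings
  rw [pvQueues_keys _ hnd]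
  apply pvLoop_eq
  constructor
  · exact (PySem.List.sorted_perm (pvGroupB strings).keys (fun x => x) true).nodup_iff.mpr hnd
  · intro k hk
    have hkmem : k ∈ (pvGroupB strings).keys :=
      (PySem.List.mem_sorted _ _ _ k).mp hk
    obtain ⟨g, hg⟩ : ∃ g, (pvGroupB strings).get? k = some g := by
      cases hgo : (pvGroupB strings).get? k with
      | none => exact absurd hkmem ((PySem.Dict.get?_eq_none_iff_not_mem_keys _ k).mp hgo)
      | some g => exact ⟨g, rfl⟩
    obtain ⟨h, t, rfl⟩ := List.exists_cons_of_ne_nil (pvGroupB_values_ne_nil strings k g hg)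
    exact ⟨h, t, 0, pvEmit (h :: t), hg, pvQueues_get? _ hnd k _ hg, le_refl 0,
      by simp [pvEmit]⟩
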